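-- pv_equiv track=rewrite | github.com/madfist/advent_of_code | aoc2016/day14/main.py | match_n
-- ===== SOURCE A (Python) =====
-- def match_n(hashcode, n, char=None):
--     hsh = list(hashcode)
--     ch = char
--     i = 0
--     for i in range(len(hsh)-n+1):
--         c = 0
--         for j in range(i,i+n):
--             if char is None:
--                 ch = hsh[i]
--             if hsh[j] != ch:
--                 break
--             else:
--                 c += 1
--         if c == n and ((i+n < len(hsh) and hsh[i+n] != ch) or (i+n == len(hsh))):
--             return ch
--     return None
-- ===== SOURCE B (Python) =====
-- from itertools import groupby
--
--
-- def match_n(hashcode, n, char=None):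
--     for k, g in groupby(hashcode):
--         if sum(1 for _ in g) >= n and (char is None or k == char):
--             return k
--     return None
-- ===== Notes on version B (the rewrite author's own statement) =====
-- stated objective: simpler
-- what changed: A scans every index with a nested n-wide window plus a lookahead test; B collapses the string once into maximal runs with itertools.groupby and returns the key of the first run of length >= n matching char.
-- outside the precondition, e.g. on match_n('aab', 0, 'z'): A returns 'z', B returns None; on match_n('aa', -1, None): A returns None, B returns 'a'; on match_n('', 0, 'x'): A returns 'x', B returns None
import Mathlib
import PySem

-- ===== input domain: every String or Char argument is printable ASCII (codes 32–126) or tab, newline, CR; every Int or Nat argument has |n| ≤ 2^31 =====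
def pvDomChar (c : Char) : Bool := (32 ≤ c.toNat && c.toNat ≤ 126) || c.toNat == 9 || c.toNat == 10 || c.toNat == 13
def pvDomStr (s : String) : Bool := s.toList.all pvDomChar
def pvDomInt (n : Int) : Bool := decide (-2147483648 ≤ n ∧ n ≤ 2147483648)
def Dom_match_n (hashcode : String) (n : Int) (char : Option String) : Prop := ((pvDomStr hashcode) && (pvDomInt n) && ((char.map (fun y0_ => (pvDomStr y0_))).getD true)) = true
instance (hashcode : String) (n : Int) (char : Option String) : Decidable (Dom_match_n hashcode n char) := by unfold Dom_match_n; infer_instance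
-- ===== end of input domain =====

-- B replaces A's per-index overlapping window scan by one groupby pass over maximal runs (objective: simpler).


-- ===== PORT A =====
-- inner loop 'for j in range(i, i+n)' with the threaded ch and the break
def aInner (hsh : List Char) (char : Option String) (i : Int) :
    List Int → Option String → Int → Option String × Int
  | [], ch, c => (ch, c)
  | j :: js, ch, c =>
      let ch' := if char = none then (PySem.List.pyGet? hsh i).map (fun d => String.ofList [d]) else ch
      if (PySem.List.pyGet? hsh j).map (fun d => String.ofList [d]) ≠ ch' then (ch', c)
      else aInner hsh char i js ch' (c + 1)

-- outer loop 'for i in range(len(hsh)-n+1)' with early return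
def aOuter (hsh : List Char) (n : Int) (char : Option String) :
    List Int → Option String → Option String
  | [], _ => none
  | i :: is, ch =>
      let p := aInner hsh char i (PySem.List.pyRange i (i + n) 1) ch 0
      if p.2 = n ∧ ((i + n < (hsh.length : Int) ∧ (PySem.List.pyGet? hsh (i + n)).map (fun d => String.ofList [d]) ≠ p.1) ∨ i + n = (hsh.length : Int))
      then p.1
      else aOuter hsh n char is p.1

def match_n (hashcode : String) (n : Int) (char : Option String) : Option String :=
  let hsh := hashcode.toList
  aOuter hsh n char (PySem.List.pyRange 0 ((hsh.length : Int) - n + 1) 1) char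

-- ===== PORT B =====
-- itertools.groupby over the characters, each group measured by its length
def pyGroupby : List Char → List (Char × Int)
  | [] => []
  | c :: cs =>
      (c, ((cs.takeWhile (fun d => d == c)).length : Int) + 1) :: pyGroupby (cs.dropWhile (fun d => d == c))
  termination_by l => l.length
  decreasing_by
    have := List.length_dropWhile_le (p := fun d => d == c) (l := cs)
    simp only [List.length_cons]; omega

-- 'for k, g in groupby(...)' with the filter and early return
def bFind (n : Int) (char : Option String) : List (Char × Int) → Option String
  | [] => none
  | (k, m) :: gs =>
      if m ≥ n ∧ (char = none ∨ char = some (String.ofList [k])) then some (String.ofList [k])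
      else bFind n char gs

def match_n_alt (hashcode : String) (n : Int) (char : Option String) : Option String :=
  bFind n char (pyGroupby hashcode.toList)

-- ===== PRECONDITION & SPEC =====
-- Pre_ excludes the degenerate run lengths n ≤ 0 (A still returns there — char itself for n = 0,
-- None for n < 0 — while B reports the first run: a corner no caller would specify either way).
def Pre_match_n (hashcode : String) (n : Int) (char : Option String) : Prop := 1 ≤ n
instance (hashcode : String) (n : Int) (char : Option String) : Decidable (Pre_match_n hashcode n char) := by unfold Pre_match_n; infer_instance

def pvWitness_match_n : String × Int × Option String := ("xaabba", 2, some "a")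

def Spec_match_n (hashcode : String) (n : Int) (char : Option String) (out : Option String) : Prop := out = match_n_alt hashcode n char
instance (hashcode : String) (n : Int) (char : Option String) (out : Option String) : Decidable (Spec_match_n hashcode n char out) := by unfold Spec_match_n; infer_instance

-- ===== CLAIM (what is proved, stated in full; the proofs are below) =====
def Claim_equal_match_n : Prop := ∀ (hashcode : String) (n : Int) (char : Option String), Dom_match_n hashcode n char → Pre_match_n hashcode n char → Spec_match_n hashcode n char (match_n hashcode n char)

-- ===== LEMMAS AND PROOFS =====

-- the value ch has after one pass of the inner loop starting at i
def chAt (hsh : List Char) (char : Option String) (i : Int) (ch : Option String) : Option String :=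
  if char = none then (PySem.List.pyGet? hsh i).map (fun d => String.ofList [d]) else ch

-- counting part of the inner loop once ch has stabilised
def scanC (hsh : List Char) (CH : Option String) : List Int → Int → Int
  | [], c => c
  | j :: js, c =>
      if (PySem.List.pyGet? hsh j).map (fun d => String.ofList [d]) ≠ CH then c
      else scanC hsh CH js (c + 1)

-- the stabilised ch value for the window starting a run with head c
def CHof (char : Option String) (c : Char) : Option String :=
  match char with | none => some (String.ofList [c]) | some s => some s

-- reference recursion: A's scan expressed as structural recursion on the string
def Fref (n : Int) (char : Option String) : List Char → Option String
  | [] => none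
  | c :: cs =>
      let l := c :: cs
      let CH : Option String := CHof char c
      if scanC l CH (PySem.List.pyRange 0 n 1) 0 = n
         ∧ ((n < (l.length : Int) ∧ (PySem.List.pyGet? l n).map (fun d => String.ofList [d]) ≠ CH) ∨ n = (l.length : Int))
      then CH
      else Fref n char cs

theorem chAt_chAt (hsh : List Char) (char : Option String) (i i' : Int) (ch : Option String) :
    chAt hsh char i' (chAt hsh char i ch) = chAt hsh char i' ch := by
  unfold chAt
  by_cases h : char = none <;> simp [h]

theorem aInner_eq (hsh : List Char) (char : Option String) (i : Int) :
    ∀ (js : List Int) (ch : Option String) (c : Int), js ≠ [] →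
      aInner hsh char i js ch c = (chAt hsh char i ch, scanC hsh (chAt hsh char i ch) js c) := by
  intro js
  induction js with
  | nil => intro ch c h; exact absurd rfl h
  | cons j js ih =>
    intro ch c _
    rw [show aInner hsh char i (j :: js) ch c =
        (if (PySem.List.pyGet? hsh j).map (fun d => String.ofList [d]) ≠ chAt hsh char i ch
         then (chAt hsh char i ch, c)
         else aInner hsh char i js (chAt hsh char i ch) (c + 1)) from rfl]
    conv_rhs => rw [show scanC hsh (chAt hsh char i ch) (j :: js) c =
        (if (PySem.List.pyGet? hsh j).map (fun d => String.ofList [d]) ≠ chAt hsh char i ch then c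
         else scanC hsh (chAt hsh char i ch) js (c + 1)) from rfl]
    split_ifs with h
    · rfl
    · cases js with
      | nil => simp [aInner, scanC]
      | cons j' js' =>
        rw [ih (chAt hsh char i ch) (c + 1) (by simp), chAt_chAt]

theorem aOuter_step (hsh : List Char) (n : Int) (char : Option String) (hn : 1 ≤ n)
    (i : Int) (is : List Int) (ch : Option String) :
    aOuter hsh n char (i :: is) ch =
      (if scanC hsh (chAt hsh char i ch) (PySem.List.pyRange i (i + n) 1) 0 = n
          ∧ ((i + n < (hsh.length : Int) ∧ (PySem.List.pyGet? hsh (i + n)).map (fun d => String.ofList [d]) ≠ chAt hsh char i ch) ∨ i + n = (hsh.length : Int))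
       then chAt hsh char i ch
       else aOuter hsh n char is (chAt hsh char i ch)) := by
  have hne : PySem.List.pyRange i (i + n) 1 ≠ [] := by
    rw [PySem.List.pyRange_one_cons (by omega)]; simp
  simp only [aOuter]
  rw [aInner_eq hsh char i _ ch 0 hne]

-- with char = None the threaded ch is overwritten before any use, so it is irrelevant
theorem aOuter_ch_irrel (hsh : List Char) (n : Int) (hn : 1 ≤ n)
    (is : List Int) (ch₁ ch₂ : Option String) :
    aOuter hsh n none is ch₁ = aOuter hsh n none is ch₂ := by
  cases is with
  | nil => rfl
  | cons i is =>
    have hch : ∀ ch : Option String, chAt hsh none i ch =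
        (PySem.List.pyGet? hsh i).map (fun d => String.ofList [d]) := by
      intro ch; simp [chAt]
    rw [aOuter_step hsh n none hn, aOuter_step hsh n none hn, hch ch₁, hch ch₂]

theorem pyGet?_cons_shift {α : Type} (x : α) (l : List α) (i : Int) (hi : 0 ≤ i) :
    PySem.List.pyGet? (x :: l) (i + 1) = PySem.List.pyGet? l i := by
  rw [PySem.List.pyGet?_of_nonneg _ (by omega), PySem.List.pyGet?_of_nonneg _ hi]
  have h1 : (i + 1).toNat = i.toNat + 1 := by omega
  simp [h1]

theorem pyRange_shift (a b : Int) :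
    PySem.List.pyRange (a + 1) (b + 1) 1 = (PySem.List.pyRange a b 1).map (· + 1) := by
  rw [PySem.List.pyRange_one, PySem.List.pyRange_one, List.map_map]
  have h1 : b + 1 - (a + 1) = b - a := by ring
  rw [h1]
  apply List.map_congr_left
  intro k _
  simp [Function.comp]
  ring

theorem scanC_shift (x : Char) (hsh : List Char) (CH : Option String) :
    ∀ (js : List Int) (c : Int), (∀ j ∈ js, 0 ≤ j) →
      scanC (x :: hsh) CH (js.map (· + 1)) c = scanC hsh CH js c := by
  intro js
  induction js with
  | nil => intro c _; rfl
  | cons j js ih =>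
    intro c hpos
    simp only [List.map, scanC]
    rw [pyGet?_cons_shift x hsh j (hpos j (by simp))]
    split_ifs with h
    · rfl
    · exact ih (c + 1) (fun j hj => hpos j (by simp [hj]))

theorem aOuter_shift (x : Char) (hsh : List Char) (n : Int) (char : Option String) (hn : 1 ≤ n) :
    ∀ (is : List Int) (ch : Option String), (∀ i ∈ is, 0 ≤ i) →
      aOuter (x :: hsh) n char (is.map (· + 1)) ch = aOuter hsh n char is ch := by
  intro is
  induction is with
  | nil => intro ch _; rfl
  | cons i is ih =>
    intro ch hpos
    have hi : 0 ≤ i := hpos i (by simp)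
    simp only [List.map]
    rw [aOuter_step _ _ _ hn, aOuter_step _ _ _ hn]
    have hch : chAt (x :: hsh) char (i + 1) ch = chAt hsh char i ch := by
      unfold chAt; rw [pyGet?_cons_shift x hsh i hi]
    have harg : i + 1 + n = (i + n) + 1 := by ring
    have hscan : scanC (x :: hsh) (chAt hsh char i ch) (PySem.List.pyRange (i + 1) (i + 1 + n) 1) 0
        = scanC hsh (chAt hsh char i ch) (PySem.List.pyRange i (i + n) 1) 0 := by
      rw [harg, pyRange_shift, scanC_shift]
      intro j hj
      rw [PySem.List.mem_pyRange_one] at hj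
      omega
    have hget : PySem.List.pyGet? (x :: hsh) (i + 1 + n) = PySem.List.pyGet? hsh (i + n) := by
      rw [harg, pyGet?_cons_shift x hsh (i + n) (by omega)]
    have hlen : ((x :: hsh).length : Int) = (hsh.length : Int) + 1 := by simp
    rw [hch, hscan, hget, hlen]
    have hlt : (i + 1 + n < (hsh.length : Int) + 1) ↔ (i + n < (hsh.length : Int)) := by omega
    have heq : (i + 1 + n = (hsh.length : Int) + 1) ↔ (i + n = (hsh.length : Int)) := by omega
    simp only [hlt, heq]
    split_ifs with h
    · rfl
    · exact ih _ (fun j hj => hpos j (by simp [hj]))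

theorem scanC_acc (hsh : List Char) (CH : Option String) :
    ∀ (js : List Int) (c : Int), scanC hsh CH js c = c + scanC hsh CH js 0 := by
  intro js
  induction js with
  | nil => intro c; simp [scanC]
  | cons j js ih =>
    intro c
    simp only [scanC]
    split_ifs with h
    · simp
    · rw [ih (c + 1), ih (0 + 1)]
      omega

theorem scanC_eq_iff (hsh : List Char) (CH : Option String) (a b : Int) (hab : a ≤ b) :
    scanC hsh CH (PySem.List.pyRange a b 1) 0 = b - a ↔
      ∀ j : Int, a ≤ j → j < b → (PySem.List.pyGet? hsh j).map (fun d => String.ofList [d]) = CH := by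
  have H : ∀ (k : Nat) (a : Int), a ≤ b → (b - a).toNat = k →
      (scanC hsh CH (PySem.List.pyRange a b 1) 0 = b - a ↔
        ∀ j : Int, a ≤ j → j < b → (PySem.List.pyGet? hsh j).map (fun d => String.ofList [d]) = CH) := by
    intro k
    induction k with
    | zero =>
      intro a ha hk
      have hab : a = b := by omega
      subst hab
      rw [PySem.List.pyRange_one_eq_nil le_rfl]
      simp only [scanC]
      constructor
      · intro _ j h1 h2; omega
      · intro _; omega
    | succ k ih =>
      intro a ha hk
      rw [PySem.List.pyRange_one_cons (by omega)]
      simp only [scanC]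
      split_ifs with h
      · constructor
        · intro h0; omega
        · intro hall; exact absurd (hall a le_rfl (by omega)) h
      · push_neg at h
        rw [scanC_acc hsh CH _ (0 + 1)]
        have hrec := ih (a + 1) (by omega) (by omega)
        constructor
        · intro h0
          have h1 : scanC hsh CH (PySem.List.pyRange (a + 1) b 1) 0 = b - (a + 1) := by omega
          intro j hj1 hj2
          rcases eq_or_lt_of_le hj1 with hje | hjl
          · rw [← hje]; exact h
          · exact (hrec.mp h1) j (by omega) hj2
        · intro hall
          have h1 : scanC hsh CH (PySem.List.pyRange (a + 1) b 1) 0 = b - (a + 1) :=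
            hrec.mpr (fun j hj1 hj2 => hall j (by omega) hj2)
          omega
  exact H (b - a).toNat a hab rfl

theorem Fref_cons (n : Int) (char : Option String) (c : Char) (cs : List Char) :
    Fref n char (c :: cs) =
      (if scanC (c :: cs) (CHof char c) (PySem.List.pyRange 0 n 1) 0 = n
          ∧ ((n < (((c :: cs).length : Nat) : Int) ∧ (PySem.List.pyGet? (c :: cs) n).map (fun d => String.ofList [d]) ≠ CHof char c) ∨ n = (((c :: cs).length : Nat) : Int))
       then CHof char c
       else Fref n char cs) := rfl

theorem aOuter_eq_Fref (n : Int) (char : Option String) (hn : 1 ≤ n) :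
    ∀ (hsh : List Char),
      aOuter hsh n char (PySem.List.pyRange 0 ((hsh.length : Int) - n + 1) 1) char = Fref n char hsh := by
  intro hsh
  induction hsh with
  | nil =>
    rw [PySem.List.pyRange_one_eq_nil (by simp; omega)]
    rfl
  | cons c cs ih =>
    by_cases hlen : ((c :: cs).length : Int) < n
    · rw [PySem.List.pyRange_one_eq_nil (by omega)]
      show (none : Option String) = Fref n char (c :: cs)
      rw [Fref_cons]
      split_ifs with hc
      · exfalso
        rcases hc.2 with ⟨h1, _⟩ | h1 <;> omega
      · rw [← ih, PySem.List.pyRange_one_eq_nil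
          (by simp only [List.length_cons] at hlen; push_cast at hlen ⊢; omega)]
        rfl
    · push_neg at hlen
      rw [PySem.List.pyRange_one_cons (by omega)]
      rw [aOuter_step _ _ _ hn]
      have hch : chAt (c :: cs) char 0 char = CHof char c := by
        cases char <;> simp [chAt, CHof]
      rw [hch]
      simp only [zero_add]
      conv_rhs => rw [Fref_cons]
      split_ifs with hc
      · rfl
      · have hCH : aOuter (c :: cs) n char (PySem.List.pyRange 1 (((c :: cs).length : Int) - n + 1) 1)
            (CHof char c)
            = aOuter (c :: cs) n char (PySem.List.pyRange 1 (((c :: cs).length : Int) - n + 1) 1) char := by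
          cases char with
          | none => exact aOuter_ch_irrel _ _ hn _ _ _
          | some s => rfl
        rw [hCH]
        have h1 : ((c :: cs).length : Int) - n + 1 = ((cs.length : Int) - n + 1) + 1 := by
          simp only [List.length_cons]; push_cast; ring
        have h2 := pyRange_shift 0 ((cs.length : Int) - n + 1)
        norm_num at h2
        rw [h1, h2, aOuter_shift c cs n char hn _ char
          (by intro j hj; rw [PySem.List.mem_pyRange_one] at hj; omega), ih]

theorem key_iff (char : Option String) (c : Char) :
    (char = none ∨ char = some (String.ofList [c])) ↔ CHof char c = some (String.ofList [c]) := by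
  cases char <;> simp [CHof]

theorem ofList_singleton_inj {a b : Char} (h : String.ofList [a] = String.ofList [b]) : a = b := by
  have h2 := congrArg String.toList h
  simpa using h2

theorem dropWhile_head_false (p : Char → Bool) :
    ∀ (cs : List Char) (t0 : Char) (t' : List Char), cs.dropWhile p = t0 :: t' → p t0 = false := by
  intro cs
  induction cs with
  | nil => intro t0 t' h; simp at h
  | cons a l ih =>
    intro t0 t' h
    by_cases ha : p a = true
    · rw [List.dropWhile_cons_of_pos ha] at h
      exact ih _ _ h
    · rw [List.dropWhile_cons_of_neg ha] at h
      injection h with h1 _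
      subst h1
      simpa using ha

theorem Fref_cond_iff (n : Int) (char : Option String) (hn : 1 ≤ n) (c : Char) (cs : List Char) :
    (scanC (c :: cs) (CHof char c) (PySem.List.pyRange 0 n 1) 0 = n
      ∧ ((n < (((c :: cs).length : Nat) : Int) ∧ (PySem.List.pyGet? (c :: cs) n).map (fun d => String.ofList [d]) ≠ CHof char c) ∨ n = (((c :: cs).length : Nat) : Int)))
    ↔ (CHof char c = some (String.ofList [c]) ∧ n = ((cs.takeWhile (fun d => d == c)).length : Int) + 1) := by
  set r := cs.takeWhile (fun d => d == c) with hr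
  set t := cs.dropWhile (fun d => d == c) with ht
  have hsplit : cs = r ++ t := (List.takeWhile_append_dropWhile).symm
  have hrc : ∀ d ∈ r, d = c := fun d hd => by simpa using List.mem_takeWhile_imp hd
  have hlen : ((c :: cs).length : Int) = (r.length : Int) + 1 + t.length := by
    rw [show (c :: cs).length = cs.length + 1 from by simp, show cs.length = r.length + t.length from by rw [hsplit]; simp]
    push_cast; ring
  have hget_run : ∀ k : Nat, k < r.length + 1 → (c :: cs)[k]? = some c := by
    intro k hk
    cases k with
    | zero => rfl
    | succ k' =>
      have hk' : k' < r.length := by omega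
      simp only [List.getElem?_cons_succ]
      rw [hsplit, List.getElem?_append_left hk', List.getElem?_eq_getElem hk']
      exact congrArg some (hrc _ (List.getElem_mem hk'))
  have hget_after : (c :: cs)[r.length + 1]? = t[0]? := by
    rw [hsplit, show c :: (r ++ t) = (c :: r) ++ t from rfl,
      List.getElem?_append_right (by simp)]
    simp
  obtain ⟨chS, hchS⟩ : ∃ s, CHof char c = some s := by cases char <;> exact ⟨_, rfl⟩
  rw [hchS]
  have hscan := scanC_eq_iff (c :: cs) (some chS) 0 n (by omega)
  rw [sub_zero] at hscan
  have hthead : ∀ t0 t', t = t0 :: t' → ¬ t0 = c := by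
    intro t0 t' ht' hne
    have hd : cs.dropWhile (fun d => d == c) = t0 :: t' := by rw [← ht]; exact ht'
    have hf := dropWhile_head_false (fun d => d == c) cs t0 t' hd
    simp [hne] at hf
  constructor
  · rintro ⟨h1, h2⟩
    have hall := hscan.mp h1
    have hc0 := hall 0 le_rfl (by omega)
    rw [PySem.List.pyGet?_zero_cons] at hc0
    have hchSc : chS = String.ofList [c] := by simpa using hc0.symm
    refine ⟨by rw [hchSc], ?_⟩
    have hnotlt : ¬ n < (r.length : Int) + 1 := by
      intro hlt
      have hidx : n.toNat < r.length + 1 := by omega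
      have hv : (PySem.List.pyGet? (c :: cs) n).map (fun d => String.ofList [d]) = some chS := by
        rw [PySem.List.pyGet?_of_nonneg _ (by omega), hget_run n.toNat hidx]
        simp [hchSc]
      rcases h2 with ⟨_, hne⟩ | heq
      · exact hne hv
      · rw [hlen] at heq; omega
    have hnotgt : ¬ (r.length : Int) + 1 < n := by
      intro hgt
      have hm := hall ((r.length : Int) + 1) (by omega) hgt
      rw [PySem.List.pyGet?_of_nonneg _ (by omega)] at hm
      have hidx : ((r.length : Int) + 1).toNat = r.length + 1 := by omega
      rw [hidx, hget_after] at hm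
      cases ht' : t with
      | nil => rw [ht'] at hm; simp at hm
      | cons t0 t' =>
        rw [ht'] at hm
        simp [hchSc] at hm
        exact hthead t0 t' ht' (ofList_singleton_inj hm)
    omega
  · rintro ⟨hk, hm⟩
    have hchSc : chS = String.ofList [c] := by simpa using hk
    have hmN : n.toNat = r.length + 1 := by omega
    constructor
    · apply hscan.mpr
      intro j hj1 hj2
      rw [PySem.List.pyGet?_of_nonneg _ hj1, hget_run j.toNat (by omega)]
      simp [hchSc]
    · cases ht' : t with
      | nil =>
        right
        have h0 : (t.length : Int) = 0 := by rw [ht']; simp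
        rw [hlen]
        omega
      | cons t0 t' =>
        left
        have h0 : 1 ≤ (t.length : Int) := by rw [ht']; simp
        constructor
        · rw [hlen]; omega
        · rw [PySem.List.pyGet?_of_nonneg _ (by omega), hmN, hget_after, ht']
          simp [hchSc]
          exact fun hx => hthead t0 t' ht' (ofList_singleton_inj hx)

theorem pyGroupby_nil : pyGroupby [] = [] := by rw [pyGroupby]

theorem pyGroupby_cons (c : Char) (cs : List Char) :
    pyGroupby (c :: cs) = (c, ((cs.takeWhile (fun d => d == c)).length : Int) + 1) :: pyGroupby (cs.dropWhile (fun d => d == c)) := by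
  rw [pyGroupby]

theorem bFind_skip (n : Int) (char : Option String) (hn : 1 ≤ n) (c : Char) (cs : List Char)
    (h : ¬ (CHof char c = some (String.ofList [c]) ∧ n = ((cs.takeWhile (fun d => d == c)).length : Int) + 1)) :
    bFind n char (pyGroupby cs) =
      bFind n char ((c, ((cs.takeWhile (fun d => d == c)).length : Int) + 1) :: pyGroupby (cs.dropWhile (fun d => d == c))) := by
  cases cs with
  | nil =>
    simp only [List.takeWhile_nil, List.dropWhile_nil, List.length_nil] at h ⊢
    rw [pyGroupby_nil]
    simp only [bFind]
    rw [if_neg]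
    rintro ⟨h1, h2⟩
    exact h ⟨(key_iff char c).mp h2, by omega⟩
  | cons c0 cs' =>
    by_cases hc0 : (c0 == c) = true
    · have hceq : c0 = c := by simpa using hc0
      subst hceq
      rw [List.takeWhile_cons_of_pos (p := fun d => d == c0) (by simp)] at h ⊢
      rw [List.dropWhile_cons_of_pos (p := fun d => d == c0) (by simp)]
      rw [pyGroupby_cons]
      simp only [bFind, List.length_cons]
      by_cases hK : (char = none ∨ char = some (String.ofList [c0]))
      · have hneq : ¬ n = ((cs'.takeWhile (fun d => d == c0)).length : Int) + 1 + 1 := by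
          intro he
          exact h ⟨(key_iff char c0).mp hK, by simp only [List.length_cons]; push_cast at he ⊢; omega⟩
        split_ifs with ha hb hb
        · rfl
        · exact absurd ⟨by rcases ha with ⟨ha1, _⟩; omega, hK⟩ hb
        · rcases hb with ⟨hb1, _⟩
          exact absurd ⟨by omega, hK⟩ ha
        · rfl
      · rw [if_neg (fun hx => hK hx.2), if_neg (fun hx => hK hx.2)]
    · rw [List.takeWhile_cons_of_neg (p := fun d => d == c) hc0] at h ⊢
      rw [List.dropWhile_cons_of_neg (p := fun d => d == c) hc0]
      simp only [List.length_nil] at h ⊢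
      conv_rhs => rw [bFind]
      rw [if_neg]
      rintro ⟨h1, h2⟩
      exact h ⟨(key_iff char c).mp h2, by omega⟩

theorem Fref_eq_bFind (n : Int) (char : Option String) (hn : 1 ≤ n) :
    ∀ (l : List Char), Fref n char l = bFind n char (pyGroupby l) := by
  intro l
  induction l with
  | nil => rw [pyGroupby_nil]; rfl
  | cons c cs ih =>
    rw [Fref_cons, pyGroupby_cons]
    by_cases hcond : (CHof char c = some (String.ofList [c]) ∧ n = ((cs.takeWhile (fun d => d == c)).length : Int) + 1)
    · rw [if_pos ((Fref_cond_iff n char hn c cs).mpr hcond)]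
      conv_rhs => rw [bFind]
      rw [if_pos ⟨by omega, (key_iff char c).mpr hcond.1⟩]
      exact hcond.1
    · rw [if_neg (fun hx => hcond ((Fref_cond_iff n char hn c cs).mp hx)), ih]
      exact bFind_skip n char hn c cs hcond

-- ===== VERDICT (by name: the statement is the Claim_ definition above) =====
theorem match_n_spec : Claim_equal_match_n := by
  intro hashcode n char _ hpre
  unfold Spec_match_n match_n match_n_alt
  rw [aOuter_eq_Fref n char hpre, Fref_eq_bFind n char hpre]
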